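-- pv_equiv track=rewrite | github.com/pypi-data/pypi-mirror-358 | packages/kpass-gen/kpass_gen-0.2.1-py3-none-any.whl/kpass/main.py | check_sequences
-- ===== SOURCE A (Python) =====
-- def check_sequences(password: str) -> bool:
--     digits = [int(c) for c in password if c.isdigit()]
--     for i in range(len(digits) - 2):
--         if digits[i] + 1 == digits[i+1] == digits[i+2] - 1:
--             return True
--         if digits[i] - 1 == digits[i+1] == digits[i+2] + 1:
--             return True
--     return False
-- ===== SOURCE B (Python) =====
-- def check_sequences(password: str) -> bool:
--     # Single pass over the password, maintaining run lengths of the current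
--     # ascending and descending digit runs; no digit list or index windows.
--     prev = None
--     asc = desc = 1
--     for c in password:
--         if not c.isdigit():
--             continue
--         d = int(c)
--         if prev is not None:
--             asc = asc + 1 if d - prev == 1 else 1
--             desc = desc + 1 if prev - d == 1 else 1
--             if asc == 3 or desc == 3:
--                 return True
--         prev = d
--     return False
-- ===== Notes on version B (the rewrite author's own statement) =====
-- stated objective: alternative
-- what changed: A first materialises a digit list and then scans 3-wide index windows digits[i..i+2]; B makes one pass over the password itself with run-length counters (asc/desc) updated per adjacent digit pair, returning as soon as a counter reaches 3.
import Mathlib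
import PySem

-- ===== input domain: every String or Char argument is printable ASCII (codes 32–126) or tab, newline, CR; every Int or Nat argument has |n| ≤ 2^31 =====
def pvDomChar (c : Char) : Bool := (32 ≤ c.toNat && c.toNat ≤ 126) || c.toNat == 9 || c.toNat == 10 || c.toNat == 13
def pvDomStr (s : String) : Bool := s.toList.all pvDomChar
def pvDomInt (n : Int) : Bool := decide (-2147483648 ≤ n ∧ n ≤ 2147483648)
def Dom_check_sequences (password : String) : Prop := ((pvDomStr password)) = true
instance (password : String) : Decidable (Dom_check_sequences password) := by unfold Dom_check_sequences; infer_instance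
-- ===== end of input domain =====

-- B replaces A's digit-list + 3-wide index windows by one pass with run-length counters; same values, no speed claim.

-- ===== PORT A =====
-- int(c) for a single digit character: exact for ASCII '0'..'9' (guarded by isdigit)
def pvDigitVal (c : Char) : Int := (c.toNat : Int) - 48

-- the loop 'for i in range(len(digits)-2)': iteration i reads digits[i], digits[i+1], digits[i+2];
-- transcribed as recursion over the successive 3-windows, early return on either match
def pvWinA : List Int → Bool
  | a :: b :: c :: rest =>
    if a + 1 = b ∧ b = c - 1 then true
    else if a - 1 = b ∧ b = c + 1 then true
    else pvWinA (b :: c :: rest)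
  | _ => false

def check_sequences (password : String) : Bool :=
  let digits := (password.toList.filter PySem.Chars.isdigit).map pvDigitVal
  pvWinA digits

-- ===== PORT B =====
-- B's loop over the password characters: state (prev?, asc, desc), early return at 3
def pvGoB : Option Int → Int → Int → List Char → Bool
  | _, _, _, [] => false
  | prev?, asc, desc, c :: rest =>
    if PySem.Chars.isdigit c then
      let d := pvDigitVal c
      match prev? with
      | some prev =>
        let asc' := if d - prev = 1 then asc + 1 else 1
        let desc' := if prev - d = 1 then desc + 1 else 1
        if asc' = 3 ∨ desc' = 3 then true
        else pvGoB (some d) asc' desc' rest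
      | none => pvGoB (some d) 1 1 rest
    else pvGoB prev? asc desc rest

def check_sequences_alt (password : String) : Bool :=
  pvGoB none 1 1 password.toList

-- ===== PRECONDITION & SPEC =====
def Spec_check_sequences (password : String) (out : Bool) : Prop := out = check_sequences_alt password
instance (password : String) (out : Bool) : Decidable (Spec_check_sequences password out) := by unfold Spec_check_sequences; infer_instance

-- ===== CLAIM (what is proved, stated in full; the proofs are below) =====
def Claim_equal_check_sequences : Prop := ∀ (password : String), Dom_check_sequences password → Spec_check_sequences password (check_sequences password)

-- ===== LEMMAS AND PROOFS =====

-- B's pass restricted to the extracted digit values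
def pvGoD : Option Int → Int → Int → List Int → Bool
  | _, _, _, [] => false
  | prev?, asc, desc, d :: rest =>
    match prev? with
    | some prev =>
      let asc' := if d - prev = 1 then asc + 1 else 1
      let desc' := if prev - d = 1 then desc + 1 else 1
      if asc' = 3 ∨ desc' = 3 then true
      else pvGoD (some d) asc' desc' rest
    | none => pvGoD (some d) 1 1 rest

theorem pvGoB_eq_goD (prev? : Option Int) (asc desc : Int) (cs : List Char) :
    pvGoB prev? asc desc cs
      = pvGoD prev? asc desc ((cs.filter PySem.Chars.isdigit).map pvDigitVal) := by
  induction cs generalizing prev? asc desc with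
  | nil => rfl
  | cons c rest ih =>
    by_cases h : PySem.Chars.isdigit c
    · simp [pvGoB, pvGoD, h, ih]
    · simp [pvGoB, h, ih]

-- the main invariant: after digits a, b the counters are exactly the run lengths
theorem pvGoD_eq_winA (ds : List Int) : ∀ (a b : Int),
    pvGoD (some b) (if b - a = 1 then 2 else 1) (if a - b = 1 then 2 else 1) ds
      = pvWinA (a :: b :: ds) := by
  induction ds with
  | nil => intro a b; simp [pvGoD, pvWinA]
  | cons c rest ih =>
    intro a b
    by_cases hup : a + 1 = b ∧ b = c - 1
    · have h1 : c - b = 1 := by omega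
      have h2 : b - a = 1 := by omega
      simp only [pvGoD, pvWinA]
      simp [hup]
      left
      rw [if_pos (show c - 1 - a = 1 by omega)]
      norm_num
    · by_cases hdn : a - 1 = b ∧ b = c + 1
      · have h1 : b - c = 1 := by omega
        have h2 : a - b = 1 := by omega
        simp only [pvGoD, pvWinA]
        simp [hdn, hup]
        left
        rw [if_pos (show a - (c + 1) = 1 by omega)]
        norm_num
      · have hasc : ¬ ((if c - b = 1 then (if b - a = 1 then (2:Int) else 1) + 1 else 1) = 3) := by
          split_ifs with h1 h2 <;> omega
        have hdesc : ¬ ((if b - c = 1 then (if a - b = 1 then (2:Int) else 1) + 1 else 1) = 3) := by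
          split_ifs with h1 h2 <;> omega
        have hasc' : (if c - b = 1 then (if b - a = 1 then (2:Int) else 1) + 1 else 1)
            = (if c - b = 1 then 2 else 1) := by
          split_ifs with h1 h2 <;> omega
        have hdesc' : (if b - c = 1 then (if a - b = 1 then (2:Int) else 1) + 1 else 1)
            = (if b - c = 1 then 2 else 1) := by
          split_ifs with h1 h2 <;> omega
        have hstep : pvWinA (a :: b :: c :: rest) = pvWinA (b :: c :: rest) := by
          simp [pvWinA, hup, hdn]
        rw [hstep, ← ih b c]
        simp only [pvGoD]
        rw [if_neg (fun h => h.elim (fun h => hasc h) (fun h => hdesc h)), hasc', hdesc']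

theorem pvGoD_start_eq_winA (ds : List Int) : pvGoD none 1 1 ds = pvWinA ds := by
  match ds with
  | [] => rfl
  | [a] => rfl
  | a :: b :: rest =>
    show pvGoD (some a) 1 1 (b :: rest) = pvWinA (a :: b :: rest)
    simp only [pvGoD]
    have hA : ¬ ((if b - a = 1 then (1:Int) + 1 else 1) = 3 ∨ (if a - b = 1 then (1:Int) + 1 else 1) = 3) := by
      rw [not_or]
      constructor <;> split_ifs <;> omega
    rw [if_neg hA]
    have h1 : (if b - a = 1 then (1:Int) + 1 else 1) = (if b - a = 1 then 2 else 1) := by split_ifs <;> omega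
    have h2 : (if a - b = 1 then (1:Int) + 1 else 1) = (if a - b = 1 then 2 else 1) := by split_ifs <;> omega
    rw [h1, h2, pvGoD_eq_winA rest a b]

-- ===== VERDICT (by name: the statement is the Claim_ definition above) =====
theorem check_sequences_spec : Claim_equal_check_sequences := by
  intro password _
  unfold Spec_check_sequences check_sequences check_sequences_alt
  rw [pvGoB_eq_goD, pvGoD_start_eq_winA]
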